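-- pv_equiv track=rewrite | github.com/taraweling/Thesis | src/graph_viz.py | _top_tfs_adjlist
-- ===== SOURCE A (Python) =====
-- def _top_tfs_adjlist(adjlist, top_tfs):
--     if top_tfs is None:
--         return adjlist
--
--     tf_scores = {}
--     for tf, edges in adjlist.items():
--         targets = set()
--         for edge in edges:
--             if isinstance(edge, (list, tuple)):
--                 targets.add(edge[0])
--             else:
--                 targets.add(edge)
--         tf_scores[tf] = len(targets)
--
--     top = sorted(tf_scores, key=tf_scores.get, reverse=True)[:top_tfs]
--     return {tf: adjlist[tf] for tf in top}
-- ===== SOURCE B (Python) =====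
-- def _top_tfs_adjlist(adjlist, top_tfs):
--     if top_tfs is None:
--         return adjlist
--
--     tf_scores = {tf: len({edge[0] if isinstance(edge, (list, tuple)) else edge
--                           for edge in edges})
--                  for tf, edges in adjlist.items()}
--
--     buckets = {}
--     for tf, score in tf_scores.items():
--         buckets.setdefault(score, []).append(tf)
--
--     max_score = max(tf_scores.values(), default=0)
--     ordered = []
--     for score in range(max_score, -1, -1):
--         ordered += buckets.get(score, [])
--
--     return {tf: adjlist[tf] for tf in ordered[:top_tfs]}
-- ===== Notes on version B (the rewrite author's own statement) =====
-- stated objective: alternative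
-- what changed: Replaces A's comparison sort of the TFs (sorted with key=tf_scores.get, reverse=True) by a counting/bucket sort: TFs are grouped into score buckets in dict order and the buckets are concatenated from the maximum score down to 0, which reproduces the stable descending tie order; the unique-target scores themselves are computed by a set comprehension instead of A's explicit loop.
import Mathlib
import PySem

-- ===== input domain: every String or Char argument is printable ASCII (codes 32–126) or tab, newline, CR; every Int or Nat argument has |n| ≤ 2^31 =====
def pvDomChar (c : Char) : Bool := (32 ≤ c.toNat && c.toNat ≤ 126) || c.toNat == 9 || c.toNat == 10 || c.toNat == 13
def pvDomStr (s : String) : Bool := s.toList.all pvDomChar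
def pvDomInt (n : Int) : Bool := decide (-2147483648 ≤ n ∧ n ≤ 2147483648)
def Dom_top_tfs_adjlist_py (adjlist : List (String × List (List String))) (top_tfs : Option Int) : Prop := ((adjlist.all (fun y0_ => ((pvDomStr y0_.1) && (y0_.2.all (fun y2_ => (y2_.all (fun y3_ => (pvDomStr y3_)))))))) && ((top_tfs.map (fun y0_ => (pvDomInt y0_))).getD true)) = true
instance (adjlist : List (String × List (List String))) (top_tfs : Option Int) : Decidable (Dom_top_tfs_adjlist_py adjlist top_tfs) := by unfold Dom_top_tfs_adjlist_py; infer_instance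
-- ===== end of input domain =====

-- B replaces A's comparison sort of the TFs by a bucket/counting sort on the scores
-- (same return value; objective: alternative decomposition).

-- ===== PORT A =====
-- edges are typed list[list[str]], so 'isinstance(edge, (list, tuple))' is always True and
-- only the 'targets.add(edge[0])' branch is reachable; edge[0] is pyGetD (exact under
-- Pre_, which requires every edge list nonempty).  adjlist[tf] is first-match lookup
-- (keys are unique under Pre_), exact via Dict.mk adjlist.
def top_tfs_adjlist_py (adjlist : List (String × List (List String))) (top_tfs : Option Int) : List (String × List (List String)) :=
  match top_tfs with
  | none => adjlist
  | some n =>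
    let tf_scores : PySem.Dict String Int :=
      adjlist.foldl (fun d p =>
        let targets : PySem.Set String :=
          p.2.foldl (fun s edge => PySem.Set.add s (PySem.List.pyGetD edge 0 "")) PySem.Set.empty
        d.insert p.1 (PySem.Set.len targets)) PySem.Dict.empty
    let top := PySem.List.slice
      (PySem.List.sorted tf_scores.keys (fun tf => tf_scores.getD tf 0) true) none (some n)
    top.map (fun tf => (tf, (PySem.Dict.mk adjlist).getD tf []))

-- ===== PORT B =====
def top_tfs_adjlist_py_alt (adjlist : List (String × List (List String))) (top_tfs : Option Int) : List (String × List (List String)) :=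
  match top_tfs with
  | none => adjlist
  | some n =>
    let tf_scores : PySem.Dict String Int :=
      PySem.Dict.ofList (adjlist.map (fun p =>
        (p.1, PySem.Set.len (PySem.Set.ofList (p.2.map (fun edge => PySem.List.pyGetD edge 0 ""))))))
    let buckets : PySem.Dict Int (List String) :=
      tf_scores.items.foldl (fun b q => b.modify q.2 [] (fun l => l ++ [q.1])) PySem.Dict.empty
    let maxScore : Int := (PySem.List.max? tf_scores.values (fun v => v)).getD 0
    let ordered : List String :=
      (PySem.List.pyRange maxScore (-1) (-1)).foldl (fun acc s => acc ++ buckets.getD s []) []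
    (PySem.List.slice ordered none (some n)).map (fun tf => (tf, (PySem.Dict.mk adjlist).getD tf []))

-- ===== PRECONDITION & SPEC =====
-- Pre_ excludes (a) adjacency lists with duplicate TF keys — a Python dict cannot carry
-- them, so the assoc-list behaviour there is an accident of the encoding — and
-- (b) when top_tfs is not None, any empty edge list, on which A raises IndexError at edge[0].
def Pre_top_tfs_adjlist_py (adjlist : List (String × List (List String))) (top_tfs : Option Int) : Prop :=
  (adjlist.map Prod.fst).Nodup ∧
  (top_tfs ≠ none → ∀ p ∈ adjlist, ∀ e ∈ p.2, e ≠ [])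
instance (adjlist : List (String × List (List String))) (top_tfs : Option Int) : Decidable (Pre_top_tfs_adjlist_py adjlist top_tfs) := by unfold Pre_top_tfs_adjlist_py; infer_instance
def pvWitness_top_tfs_adjlist_py : (List (String × List (List String))) × Option Int :=
  ([("a", [["x"], ["y"]]), ("b", [["x"]]), ("c", [["x"], ["x"]])], some 2)

def Spec_top_tfs_adjlist_py (adjlist : List (String × List (List String))) (top_tfs : Option Int) (out : List (String × List (List String))) : Prop := out = top_tfs_adjlist_py_alt adjlist top_tfs
instance (adjlist : List (String × List (List String))) (top_tfs : Option Int) (out : List (String × List (List String))) : Decidable (Spec_top_tfs_adjlist_py adjlist top_tfs out) := by unfold Spec_top_tfs_adjlist_py; infer_instance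

-- ===== CLAIM (what is proved, stated in full; the proofs are below) =====
def Claim_equal_top_tfs_adjlist_py : Prop := ∀ (adjlist : List (String × List (List String))) (top_tfs : Option Int), Dom_top_tfs_adjlist_py adjlist top_tfs → Pre_top_tfs_adjlist_py adjlist top_tfs → Spec_top_tfs_adjlist_py adjlist top_tfs (top_tfs_adjlist_py adjlist top_tfs)

-- ===== LEMMAS AND PROOFS =====

-- insertBy passes over a prefix none of whose elements x should precede
theorem pv_insertBy_append {α : Type} (before : α → α → Bool) (x : α) (l₁ l₂ : List α)
    (h : ∀ y ∈ l₁, before x y = false) :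
    PySem.List.insertBy before x (l₁ ++ l₂) = l₁ ++ PySem.List.insertBy before x l₂ := by
  induction l₁ with
  | nil => simp
  | cons y t ih =>
    have hy : before x y = false := h y (by simp)
    simp only [List.cons_append, PySem.List.insertBy, hy]
    simp [ih (fun z hz => h z (by simp [hz]))]

-- insertBy puts x in front when x should precede every element
theorem pv_insertBy_front {α : Type} (before : α → α → Bool) (x : α) (l : List α)
    (h : ∀ y ∈ l, before x y = true) :
    PySem.List.insertBy before x l = x :: l := by
  cases l with
  | nil => rfl
  | cons y t => simp [PySem.List.insertBy, h y (by simp)]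

-- inserting x into the bucket concatenation lands at the end of its own bucket
theorem pv_insertBy_flatMap {α : Type} (key : α → Int) (R : List Int)
    (hR : R.Pairwise (fun a b => b < a)) (x : α) (pre : List α) (hx : key x ∈ R) :
    PySem.List.insertBy (fun a b => decide (key b < key a)) x
        (R.flatMap (fun s => pre.filter (fun t => key t == s)))
      = R.flatMap (fun s => (pre ++ [x]).filter (fun t => key t == s)) := by
  induction R with
  | nil => simp at hx
  | cons v R' ih =>
    have hR' : R'.Pairwise (fun a b => b < a) := hR.tail
    have hlt : ∀ s ∈ R', s < v := fun s hs => (List.pairwise_cons.mp hR).1 s hs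
    by_cases hv : key x = v
    · -- x joins bucket v, after its existing members and before every later bucket
      have h1 : ∀ y ∈ pre.filter (fun t => key t == v), (decide (key y < key x) : Bool) = false := by
        intro y hy
        have : key y = v := by simpa using (List.of_mem_filter hy)
        simp [this, hv]
      have h2 : ∀ y ∈ R'.flatMap (fun s => pre.filter (fun t => key t == s)),
          (decide (key y < key x) : Bool) = true := by
        intro y hy
        obtain ⟨s, hs, hy'⟩ := List.mem_flatMap.mp hy
        have : key y = s := by simpa using (List.of_mem_filter hy')
        simp [this, hv]
        exact hlt s hs
      rw [List.flatMap_cons, pv_insertBy_append _ _ _ _ h1, pv_insertBy_front _ _ _ h2]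
      have hx' : ∀ s ∈ R', ((pre ++ [x]).filter (fun t => key t == s)) = pre.filter (fun t => key t == s) := by
        intro s hs
        have : (key x == s) = false := by
          have := hlt s hs; simp [hv]; omega
        simp [List.filter_append, this]
      rw [List.flatMap_cons, List.flatMap_congr hx']
      simp [List.filter_append, hv]
    · -- x belongs to a later (strictly smaller) bucket
      have hxR' : key x ∈ R' := by
        rcases List.mem_cons.mp hx with h | h
        · exact absurd h hv
        · exact h
      have hxv : key x < v := hlt _ hxR'
      have h1 : ∀ y ∈ pre.filter (fun t => key t == v), (decide (key y < key x) : Bool) = false := by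
        intro y hy
        have : key y = v := by simpa using (List.of_mem_filter hy)
        simp [this]; omega
      rw [List.flatMap_cons, pv_insertBy_append _ _ _ _ h1, ih hR' hxR']
      have : ((pre ++ [x]).filter (fun t => key t == v)) = pre.filter (fun t => key t == v) := by
        have : (key x == v) = false := by simp [hv]
        simp [List.filter_append, this]
      rw [List.flatMap_cons, this]

-- the stable descending sort is the bucket concatenation over the descending range
theorem pv_sorted_rev_eq_buckets {α : Type} (key : α → Int) (M : Int) (xs : List α)
    (h : ∀ t ∈ xs, 0 ≤ key t ∧ key t ≤ M) :
    PySem.List.sorted xs key true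
      = (PySem.List.pyRange M (-1) (-1)).flatMap (fun s => xs.filter (fun t => key t == s)) := by
  have hR : (PySem.List.pyRange M (-1) (-1)).Pairwise (fun a b => b < a) := by
    rw [PySem.List.pyRange_neg_one_eq_reverse]
    exact List.pairwise_reverse.mpr (by simpa using PySem.List.pairwise_lt_pyRange_one (-1 + 1) (M + 1))
  rw [PySem.List.sorted_rev_eq_foldl_insertBy]
  induction xs using List.reverseRecOn with
  | nil => simp
  | append_singleton pre x ih =>
    have hpre : ∀ t ∈ pre, 0 ≤ key t ∧ key t ≤ M := fun t ht => h t (by simp [ht])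
    have hx : key x ∈ PySem.List.pyRange M (-1) (-1) := by
      rw [PySem.List.mem_pyRange_neg_one]
      have := h x (by simp); omega
    rw [List.foldl_append, List.foldl_cons, List.foldl_nil, ih hpre]
    exact pv_insertBy_flatMap key _ hR x pre hx

-- Dict.ofList of a mapped list is the insert fold
theorem pv_ofList_map_eq_foldl {κ ν : Type} [BEq κ] {β : Type} (l : List β) (f : β → κ × ν) :
    PySem.Dict.ofList (l.map f) = l.foldl (fun d b => d.insert (f b).1 (f b).2) PySem.Dict.empty := by
  show PySem.Dict.update _ _ = _
  rw [PySem.Dict.update, List.foldl_map]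

-- all values of the score dict built by A's fold are nonnegative
theorem pv_values_nonneg (adjlist : List (String × List (List String)))
    (d : PySem.Dict String Int) (hd : ∀ v ∈ d.values, 0 ≤ v) :
    ∀ v ∈ (adjlist.foldl (fun d p =>
        d.insert p.1 (PySem.Set.len
          (p.2.foldl (fun s edge => PySem.Set.add s (PySem.List.pyGetD edge 0 "")) PySem.Set.empty))) d).values,
      0 ≤ v := by
  induction adjlist generalizing d with
  | nil => simpa using hd
  | cons p t ih =>
    rw [List.foldl_cons]
    refine ih _ (fun v hv => ?_)
    rcases PySem.Dict.mem_values_insert _ _ _ _ hv with h | h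
    · subst h; simp [PySem.Set.len]
    · exact hd v h

-- a key's getD value is one of the dict's values (nodup keys)
theorem pv_getD_mem_values {κ ν : Type} [BEq κ] [LawfulBEq κ] (d : PySem.Dict κ ν)
    (hk : d.keys.Nodup) (k : κ) (h : k ∈ d.keys) (d0 : ν) : d.getD k d0 ∈ d.values := by
  obtain ⟨v, hv⟩ : ∃ v, (k, v) ∈ d.items := by simpa [PySem.Dict.keys] using h
  have : d.getD k d0 = v := PySem.Dict.getD_of_mem_items d hv hk d0
  rw [this]
  have : v ∈ d.items.map (fun q => q.2) := List.mem_map.mpr ⟨(k, v), hv, rfl⟩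
  simpa [PySem.Dict.values] using this

-- keys-side buckets equal items-side buckets (nodup keys)
theorem pv_keys_filter_eq_items_filter (d : PySem.Dict String Int) (hk : d.keys.Nodup) (s : Int) :
    d.keys.filter (fun t => d.getD t 0 == s)
      = (d.items.filter (fun q => q.2 == s)).map (fun q => q.1) := by
  show (d.items.map (fun q => q.1)).filter _ = _
  rw [List.filter_map]
  congr 1
  apply List.filter_congr
  intro q hq
  have : d.getD q.1 0 = q.2 := PySem.Dict.getD_of_mem_items d (by simpa using hq) hk 0
  simp [Function.comp, this]

-- B's buckets dict, read back at a score, is the filtered item list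
theorem pv_buckets_getD (l : List (String × Int)) (s : Int) :
    (l.foldl (fun b q => b.modify q.2 [] (fun a => a ++ [q.1])) PySem.Dict.empty).getD s []
      = (l.filter (fun q => q.2 == s)).map (fun q => q.1) := by
  have h1 : l.foldl (fun b q => b.modify q.2 [] (fun a => a ++ [q.1])) PySem.Dict.empty
      = (l.map (fun q => (q.2, q.1))).foldl
          (fun (b : PySem.Dict Int (List String)) p => b.modify p.1 [] (fun a => a ++ [p.2]))
          PySem.Dict.empty := by
    simp only [List.foldl_map]
  rw [h1, PySem.Dict.getD_foldl_modify_append]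
  simp [List.filter_map, Function.comp_def]

-- ===== VERDICT (by name: the statement is the Claim_ definition above) =====
theorem top_tfs_adjlist_py_spec : Claim_equal_top_tfs_adjlist_py := by
  intro adjlist top_tfs _hdom hpre
  unfold Spec_top_tfs_adjlist_py
  cases top_tfs with
  | none => rfl
  | some n =>
    simp only [top_tfs_adjlist_py, top_tfs_adjlist_py_alt]
    -- the two score dicts coincide
    have hdict : PySem.Dict.ofList (adjlist.map (fun p =>
        (p.1, PySem.Set.len (PySem.Set.ofList (p.2.map (fun edge => PySem.List.pyGetD edge 0 "")))))) =
        adjlist.foldl (fun d p =>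
          d.insert p.1 (PySem.Set.len
            (p.2.foldl (fun s edge => PySem.Set.add s (PySem.List.pyGetD edge 0 "")) PySem.Set.empty)))
          PySem.Dict.empty := by
      rw [pv_ofList_map_eq_foldl]
      congr 1
      funext d p
      have he : PySem.Set.ofList (p.2.map (fun edge => PySem.List.pyGetD edge 0 ""))
          = p.2.foldl (fun s edge => PySem.Set.add s (PySem.List.pyGetD edge 0 "")) PySem.Set.empty := by
        rw [← PySem.Set.update_nil_left, PySem.Set.update_map_eq_foldl_add]; rfl
      simp [he]
    rw [hdict]
    set dscore := adjlist.foldl (fun d p =>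
        d.insert p.1 (PySem.Set.len
          (p.2.foldl (fun s edge => PySem.Set.add s (PySem.List.pyGetD edge 0 "")) PySem.Set.empty)))
        PySem.Dict.empty with hds
    have hk : dscore.keys.Nodup := by
      rw [hds]
      exact PySem.Dict.nodup_keys_foldl_insert_key adjlist (fun p => p.1) _ PySem.Dict.empty
        (by simp [PySem.Dict.keys, PySem.Dict.empty])
    have hvals : ∀ v ∈ dscore.values, 0 ≤ v := by
      rw [hds]
      exact pv_values_nonneg adjlist PySem.Dict.empty
        (by intro v hv; simp [PySem.Dict.values, PySem.Dict.empty] at hv)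
    have hbound : ∀ t ∈ dscore.keys,
        0 ≤ dscore.getD t 0 ∧ dscore.getD t 0 ≤ (PySem.List.max? dscore.values (fun v => v)).getD 0 := by
      intro t ht
      have hv : dscore.getD t 0 ∈ dscore.values := pv_getD_mem_values dscore hk t ht 0
      refine ⟨hvals _ hv, ?_⟩
      cases hm : PySem.List.max? dscore.values (fun v => v) with
      | none =>
        have := (PySem.List.max?_eq_none_iff _ _).mp hm
        rw [this] at hv; simp at hv
      | some m =>
        have := PySem.List.max?_isMax hm _ hv
        simpa [hm] using this
    have hord : PySem.List.sorted dscore.keys (fun tf => dscore.getD tf 0) true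
        = (PySem.List.pyRange ((PySem.List.max? dscore.values (fun v => v)).getD 0) (-1) (-1)).foldl
            (fun acc s => acc ++ (dscore.items.foldl
              (fun b q => b.modify q.2 [] (fun l => l ++ [q.1])) PySem.Dict.empty).getD s []) [] := by
      rw [PySem.List.foldl_append_eq_flatMap, List.nil_append,
        pv_sorted_rev_eq_buckets (fun tf => dscore.getD tf 0) _ _ hbound]
      apply List.flatMap_congr
      intro s _
      rw [pv_buckets_getD, pv_keys_filter_eq_items_filter dscore hk s]
    rw [hord]
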